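-- pv_equiv track=rewrite | github.com/gtair/even_spacing | main.py | calculate_even_placements
-- ===== SOURCE A (Python) =====
-- def calculate_even_placements(length, edge_placement):
--     placements = []
--
--     adjusted_length = length if edge_placement else length + 2
--
--     for num_objects in range(2, adjusted_length + 1):
--         step_size = (adjusted_length - 1) // (num_objects - 1)
--
--         if (adjusted_length - 1) % (num_objects - 1) == 0:
--             positions = [i * step_size + 1 for i in range(num_objects)]
--
--             if not edge_placement:
--                 positions = positions[1:-1]
--                 positions = [x - 1 for x in positions]
--
--             placements.append(positions)
--
--     return placements
-- ===== SOURCE B (Python) =====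
-- def calculate_even_placements(length, edge_placement):
--     adjusted_length = length if edge_placement else length + 2
--     n = adjusted_length - 1
--     if n < 1:
--         return []
--     divs = set()
--     i = 1
--     while i * i <= n:
--         if n % i == 0:
--             divs.add(i)
--             divs.add(n // i)
--         i += 1
--     result = []
--     for d in sorted(divs):
--         step_size = n // d
--         positions = [j * step_size + 1 for j in range(d + 1)]
--         if not edge_placement:
--             positions = [x - 1 for x in positions[1:-1]]
--         result.append(positions)
--     return result
-- ===== Notes on version B (the rewrite author's own statement) =====
-- stated objective: faster
-- what changed: B enumerates the divisors of adjusted_length-1 with a sqrt-bounded divisor-pairing loop and sorts them ascending, instead of A's trial division over every candidate object count from 2 to adjusted_length; the placement lists are then built per divisor.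
import Mathlib
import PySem

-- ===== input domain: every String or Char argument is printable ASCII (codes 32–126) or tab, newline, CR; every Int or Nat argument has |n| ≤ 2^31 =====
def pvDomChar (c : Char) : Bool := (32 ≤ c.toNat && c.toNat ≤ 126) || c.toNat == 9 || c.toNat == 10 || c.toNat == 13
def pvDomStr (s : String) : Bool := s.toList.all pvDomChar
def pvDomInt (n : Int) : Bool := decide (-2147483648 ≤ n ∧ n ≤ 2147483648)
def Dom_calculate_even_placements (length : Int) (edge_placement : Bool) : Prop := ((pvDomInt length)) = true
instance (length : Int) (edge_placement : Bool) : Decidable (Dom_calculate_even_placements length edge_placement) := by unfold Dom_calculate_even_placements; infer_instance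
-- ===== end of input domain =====

-- B replaces A's full trial loop over all candidate object counts by a √n divisor-pairing
-- enumeration of (adjusted_length - 1)'s divisors, sorted ascending (objective: alternative).

-- ===== PORT A =====
def calculate_even_placements (length : Int) (edge_placement : Bool) : List (List Int) :=
  let adjusted_length := if edge_placement then length else length + 2
  (PySem.List.pyRange 2 (adjusted_length + 1) 1).foldl (fun placements num_objects =>
    let step_size := PySem.Int.floordiv (adjusted_length - 1) (num_objects - 1)
    if PySem.Int.mod (adjusted_length - 1) (num_objects - 1) == 0 then
      let positions := (PySem.List.pyRange 0 num_objects 1).map (fun i => i * step_size + 1)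
      let positions :=
        if !edge_placement then
          (PySem.List.slice positions (some 1) (some (-1))).map (fun x => x - 1)
        else positions
      placements ++ [positions]
    else placements) []

-- ===== PORT B =====
-- the `while i * i <= n:` loop of Source B collecting divisor pairs into the set
def pvCollectDivs (n : Int) (i : Int) (divs : PySem.Set Int) : PySem.Set Int :=
  if _h : i * i ≤ n then
    pvCollectDivs n (i + 1)
      (if PySem.Int.mod n i == 0 then
        PySem.Set.add (PySem.Set.add divs i) (PySem.Int.floordiv n i)
      else divs)
  else divs
termination_by (n + 1 - i).toNat
decreasing_by
  have hin : i ≤ n := by nlinarith [sq_nonneg i, sq_nonneg (i - 1)]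
  omega

def calculate_even_placements_alt (length : Int) (edge_placement : Bool) : List (List Int) :=
  let adjusted_length := if edge_placement then length else length + 2
  let n := adjusted_length - 1
  if n < 1 then []
  else
    let divs := pvCollectDivs n 1 PySem.Set.empty
    (PySem.List.sorted divs (fun x => x) false).foldl (fun result d =>
      let step_size := PySem.Int.floordiv n d
      let positions := (PySem.List.pyRange 0 (d + 1) 1).map (fun j => j * step_size + 1)
      let positions :=
        if !edge_placement then
          (PySem.List.slice positions (some 1) (some (-1))).map (fun x => x - 1)
        else positions
      result ++ [positions]) []

-- ===== PRECONDITION & SPEC =====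
def Spec_calculate_even_placements (length : Int) (edge_placement : Bool) (out : List (List Int)) : Prop := out = calculate_even_placements_alt length edge_placement
instance (length : Int) (edge_placement : Bool) (out : List (List Int)) : Decidable (Spec_calculate_even_placements length edge_placement out) := by unfold Spec_calculate_even_placements; infer_instance

-- ===== CLAIM (what is proved, stated in full; the proofs are below) =====
def Claim_equal_calculate_even_placements : Prop := ∀ (length : Int) (edge_placement : Bool), Dom_calculate_even_placements length edge_placement → Spec_calculate_even_placements length edge_placement (calculate_even_placements length edge_placement)

-- ===== LEMMAS AND PROOFS =====

-- the ascending divisor list of n (proof-side name for what both sides compute)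
def pvDivList (n : Int) : List Int :=
  (PySem.List.pyRange 1 (n + 1) 1).filter (fun d => PySem.Int.mod n d == 0)

theorem mem_pvCollectDivs (n i : Int) (divs : PySem.Set Int) (x : Int) (hi : 1 ≤ i) :
    x ∈ pvCollectDivs n i divs ↔
      x ∈ divs ∨ ∃ j, i ≤ j ∧ j * j ≤ n ∧ PySem.Int.mod n j = 0 ∧
        (x = j ∨ x = PySem.Int.floordiv n j) := by
  induction i, divs using pvCollectDivs.induct (n := n) with
  | case1 i divs h ih =>
    have ih := ih (by omega)
    rw [pvCollectDivs]
    by_cases hm : (PySem.Int.mod n i == 0) = true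
    · simp only [h, dite_true, hm, if_true] at ih ⊢
      rw [ih]
      simp only [PySem.Set.mem_add]
      constructor
      · rintro (((hx | rfl) | rfl) | ⟨j, hj, hjj, hjm, hxj⟩)
        · exact Or.inl hx
        · exact Or.inr ⟨x, le_refl _, h, by simpa using hm, Or.inl rfl⟩
        · exact Or.inr ⟨i, le_refl _, h, by simpa using hm, Or.inr rfl⟩
        · exact Or.inr ⟨j, by omega, hjj, hjm, hxj⟩
      · rintro (hx | ⟨j, hj, hjj, hjm, hxj⟩)
        · exact Or.inl (Or.inl (Or.inl hx))
        · rcases eq_or_lt_of_le hj with rfl | hlt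
          · rcases hxj with rfl | rfl
            · exact Or.inl (Or.inl (Or.inr rfl))
            · exact Or.inl (Or.inr rfl)
          · exact Or.inr ⟨j, by omega, hjj, hjm, hxj⟩
    · simp only [h, dite_true, hm, Bool.false_eq_true, if_false, dite_false] at ih ⊢
      rw [ih]
      constructor
      · rintro (hx | ⟨j, hj, hjj, hjm, hxj⟩)
        · exact Or.inl hx
        · exact Or.inr ⟨j, by omega, hjj, hjm, hxj⟩
      · rintro (hx | ⟨j, hj, hjj, hjm, hxj⟩)
        · exact Or.inl hx
        · rcases eq_or_lt_of_le hj with rfl | hlt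
          · exact absurd hjm (by simpa using hm)
          · exact Or.inr ⟨j, by omega, hjj, hjm, hxj⟩
  | case2 i divs h =>
    rw [pvCollectDivs]
    simp only [h, dite_false]
    constructor
    · exact Or.inl
    · rintro (hx | ⟨j, hj, hjj, _, _⟩)
      · exact hx
      · exact absurd hjj (by push Not at h ⊢; nlinarith)

theorem nodup_pvCollectDivs (n i : Int) (divs : PySem.Set Int) (h : divs.Nodup) :
    (pvCollectDivs n i divs).Nodup := by
  induction i, divs using pvCollectDivs.induct (n := n) with
  | case1 i divs hlt ih =>
    rw [pvCollectDivs]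
    simp only [hlt, dite_true]
    apply ih
    split
    · exact PySem.Set.nodup_add _ _ (PySem.Set.nodup_add _ _ h)
    · exact h
  | case2 i divs hlt =>
    rw [pvCollectDivs]; simpa [hlt] using h

theorem mem_collect_iff_div (n : Int) (hn : 1 ≤ n) (x : Int) :
    x ∈ pvCollectDivs n 1 PySem.Set.empty ↔ (1 ≤ x ∧ x < n + 1 ∧ PySem.Int.mod n x = 0) := by
  rw [mem_pvCollectDivs n 1 _ x le_rfl]
  simp only [PySem.Set.empty, List.not_mem_nil, false_or]
  constructor
  · rintro ⟨j, hj1, hjj, hjm, rfl | rfl⟩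
    · refine ⟨hj1, by nlinarith, hjm⟩
    · rw [PySem.Int.mod_eq_zero_iff_dvd] at hjm
      have hj0 : 0 < j := by omega
      rw [PySem.Int.floordiv_eq_ediv_of_pos hj0]
      obtain ⟨c, hc⟩ := hjm
      have hcv : n / j = c := by rw [hc]; exact Int.mul_ediv_cancel_left c (by omega)
      rw [hcv]
      have hc1 : 1 ≤ c := by nlinarith
      refine ⟨hc1, by nlinarith, ?_⟩
      rw [PySem.Int.mod_eq_zero_iff_dvd]
      exact ⟨j, by linarith [hc, mul_comm j c]⟩
  · rintro ⟨hx1, hxn, hxm⟩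
    have hx0 : 0 < x := by omega
    rw [PySem.Int.mod_eq_zero_iff_dvd] at hxm
    obtain ⟨c, hc⟩ := hxm
    have hc1 : 1 ≤ c := by nlinarith
    by_cases hxx : x * x ≤ n
    · exact ⟨x, hx1, hxx, by rw [PySem.Int.mod_eq_zero_iff_dvd]; exact ⟨c, hc⟩, Or.inl rfl⟩
    · refine ⟨c, hc1, by nlinarith, ?_, Or.inr ?_⟩
      · rw [PySem.Int.mod_eq_zero_iff_dvd]; exact ⟨x, by linarith [hc, mul_comm x c]⟩
      · rw [PySem.Int.floordiv_eq_ediv_of_pos (by omega), hc]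
        rw [mul_comm]
        rw [Int.mul_ediv_cancel_left x (by omega)]

theorem pairwise_pvDivList (n : Int) : (pvDivList n).Pairwise (fun a b => a < b) := by
  exact List.Pairwise.filter _ (PySem.List.pairwise_lt_pyRange_one 1 (n+1))

theorem mem_pvDivList (n x : Int) :
    x ∈ pvDivList n ↔ (1 ≤ x ∧ x < n + 1 ∧ PySem.Int.mod n x = 0) := by
  simp [pvDivList, List.mem_filter, PySem.List.mem_pyRange_one, and_assoc]

theorem nodup_pvDivList (n : Int) : (pvDivList n).Nodup :=
  (PySem.List.nodup_pyRange_one 1 (n+1)).filter _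

theorem sorted_collect_eq (n : Int) (hn : 1 ≤ n) :
    PySem.List.sorted (pvCollectDivs n 1 PySem.Set.empty) (fun x => x) false = pvDivList n := by
  have h1 : (pvDivList n).Perm (pvCollectDivs n 1 PySem.Set.empty) := by
    apply (List.perm_ext_iff_of_nodup (nodup_pvDivList n)
      (nodup_pvCollectDivs n 1 _ (by simp [PySem.Set.empty]))).mpr
    intro a
    rw [mem_pvDivList, mem_collect_iff_div n hn]
  exact PySem.List.sorted_eq_of_perm_of_pairwise_lt _ _ _ h1 (pairwise_pvDivList n)

theorem pyRange_shift (a b : Int) :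
    PySem.List.pyRange (a + 1) (b + 1) 1 = (PySem.List.pyRange a b 1).map (fun x => x + 1) := by
  rw [PySem.List.pyRange_one, PySem.List.pyRange_one, List.map_map]
  have h : b + 1 - (a + 1) = b - a := by ring
  rw [h]
  apply List.map_congr_left
  intro k _
  simp only [Function.comp_apply]
  ring

-- ===== VERDICT (by name: the statement is the Claim_ definition above) =====
theorem calculate_even_placements_spec : Claim_equal_calculate_even_placements := by
  intro length ep _
  unfold Spec_calculate_even_placements calculate_even_placements calculate_even_placements_alt
  simp only []
  set a := if ep then length else length + 2 with ha
  by_cases hn : a - 1 < 1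
  · rw [if_pos hn, PySem.List.pyRange_one_eq_nil (by omega)]
    rfl
  · rw [if_neg hn]
    rw [PySem.List.foldl_append_if, PySem.List.foldl_append_singleton_eq_map]
    rw [sorted_collect_eq (a - 1) (by omega)]
    have hsh : PySem.List.pyRange 2 (a + 1) 1
        = (PySem.List.pyRange 1 a 1).map (fun x => x + 1) := by
      have := pyRange_shift 1 a
      simpa using this
    have ha1 : a = (a - 1) + 1 := by ring
    rw [hsh, List.filter_map, List.map_map]
    have hfilter : (PySem.List.pyRange 1 a 1).filter
          ((fun x => PySem.Int.mod (a - 1) (x - 1) == 0) ∘ (fun x => x + 1))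
        = pvDivList (a - 1) := by
      rw [pvDivList, ← ha1]
      apply List.filter_congr
      intro d _
      simp only [Function.comp_apply, add_sub_cancel_right]
    rw [hfilter]
    apply List.map_congr_left
    intro d _
    simp only [Function.comp_apply, add_sub_cancel_right]
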